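-- pv_equiv track=rewrite | github.com/fl1ghtly/tic-tac-toe | tictactoe.py | possMoves
-- ===== SOURCE A (Python) =====
-- def possMoves(board, size):
--     # Converts from integer positions to the index values usable by
--     # the board list
--     possDic = {}
--     i = 1
--     for y in range(len(board)):
--         for x in range(len(board[0])):
--             possDic.update({i:[y, x]})
--             i += 1
--     return possDic
-- ===== SOURCE B (Python) =====
-- def possMoves(board, size):
--     # Same mapping built as one flat dict comprehension: the 1..rows*cols
--     # positions are decoded arithmetically with divmod instead of nested loops.
--     cols = len(board[0]) if board else 0
--     total = len(board) * cols
--     return {i: list(divmod(i - 1, cols)) for i in range(1, total + 1)}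
-- ===== Notes on version B (the rewrite author's own statement) =====
-- stated objective: idiomatic
-- what changed: Replaces the nested row/column loops with a mutable counter and per-step dict.update by a single flat dict comprehension over range(1, rows*cols+1) that decodes each position arithmetically with divmod.
import Mathlib
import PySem

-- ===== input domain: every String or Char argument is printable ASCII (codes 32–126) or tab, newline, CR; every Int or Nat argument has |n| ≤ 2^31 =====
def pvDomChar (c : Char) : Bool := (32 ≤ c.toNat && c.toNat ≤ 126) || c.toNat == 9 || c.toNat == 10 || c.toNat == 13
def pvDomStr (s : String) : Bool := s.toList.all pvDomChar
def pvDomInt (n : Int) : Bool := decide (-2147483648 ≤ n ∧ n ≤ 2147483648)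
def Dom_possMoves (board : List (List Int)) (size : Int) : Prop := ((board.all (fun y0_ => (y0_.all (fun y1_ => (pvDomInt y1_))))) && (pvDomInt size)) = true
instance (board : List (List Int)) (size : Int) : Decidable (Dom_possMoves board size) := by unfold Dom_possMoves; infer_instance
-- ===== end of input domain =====

-- B replaces A's nested row/column loops + counter by one flat comprehension decoding
-- positions with divmod; objective: idiomatic.

-- ===== PORT A =====
-- nested 'for y in range(len(board)): for x in range(len(board[0])):' building possDic
def possMoves (board : List (List Int)) (size : Int) : List (Int × List Int) :=
  let st :=
    (PySem.List.pyRange 0 (board.length : Int) 1).foldl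
      (fun (st : PySem.Dict Int (List Int) × Int) y =>
        (PySem.List.pyRange 0 ((PySem.List.pyGetD board 0 []).length : Int) 1).foldl
          (fun st x => (st.1.insert st.2 [y, x], st.2 + 1)) st)
      (PySem.Dict.empty, 1)
  st.1.items

-- ===== PORT B =====
-- cols = len(board[0]) if board else 0; flat comprehension over range(1, total+1) with divmod
def possMoves_alt (board : List (List Int)) (size : Int) : List (Int × List Int) :=
  let cols : Int := ((board.headD []).length : Int)
  let total : Int := (board.length : Int) * cols
  (PySem.List.pyRange 1 (total + 1) 1).map
    (fun i => (i, [PySem.Int.floordiv (i - 1) cols, PySem.Int.mod (i - 1) cols]))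

-- ===== PRECONDITION & SPEC =====
def Spec_possMoves (board : List (List Int)) (size : Int) (out : List (Int × List Int)) : Prop := out = possMoves_alt board size
instance (board : List (List Int)) (size : Int) (out : List (Int × List Int)) : Decidable (Spec_possMoves board size out) := by unfold Spec_possMoves; infer_instance

-- ===== CLAIM (what is proved, stated in full; the proofs are below) =====
def Claim_equal_possMoves : Prop := ∀ (board : List (List Int)) (size : Int), Dom_possMoves board size → Spec_possMoves board size (possMoves board size)

-- ===== LEMMAS AND PROOFS =====

-- enumerate distributes over append
lemma pv_enumerate_append {α : Type} (xs ys : List α) (s : Int) :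
    PySem.List.enumerate (xs ++ ys) s
      = PySem.List.enumerate xs s ++ PySem.List.enumerate ys (s + (xs.length : Int)) := by
  induction xs generalizing s with
  | nil => simp [PySem.List.enumerate_nil]
  | cons a xs ih =>
      simp only [List.cons_append, PySem.List.enumerate_cons, ih, List.length_cons]
      have h : s + ((xs.length + 1 : Nat) : Int) = s + 1 + (xs.length : Int) := by push_cast; ring
      rw [h]

-- A's inner loop over fresh increasing keys appends enumerated values
lemma pv_inner (L : List Int) (y : Int) :
    ∀ (d : PySem.Dict Int (List Int)) (i : Int), (∀ k ∈ d.keys, k < i) →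
    L.foldl (fun (st : PySem.Dict Int (List Int) × Int) x => (st.1.insert st.2 [y, x], st.2 + 1)) (d, i)
      = (PySem.Dict.mk (d.items ++ PySem.List.enumerate (L.map (fun x => [y, x])) i),
         i + (L.length : Int)) := by
  induction L with
  | nil =>
      intro d i _
      simp [PySem.List.enumerate_nil]
  | cons x L ih =>
      intro d i hfresh
      have hnc : d.contains i = false := by
        cases hc : d.contains i with
        | false => rfl
        | true =>
            have : i ∈ d.keys := (PySem.Dict.contains_iff_mem_keys d i).1 hc
            exact absurd (hfresh i this) (lt_irrefl i)
      have hins : d.insert i [y, x] = PySem.Dict.mk (d.items ++ [(i, [y, x])]) := by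
        apply PySem.Dict.ext
        simp [PySem.Dict.items_insert, hnc]
      have hkeys : ∀ k ∈ (PySem.Dict.mk (d.items ++ [(i, [y, x])]) : PySem.Dict Int (List Int)).keys, k < i + 1 := by
        intro k hk
        simp only [PySem.Dict.keys, List.map_append, List.mem_append] at hk
        rcases hk with hk | hk
        · exact lt_trans (hfresh k hk) (by omega)
        · simp at hk; omega
      simp only [List.foldl_cons, hins]
      rw [ih _ (i + 1) hkeys]
      simp only [List.map_cons, PySem.List.enumerate_cons, List.length_cons, Prod.mk.injEq]
      constructor
      · congr 1; simp
      · push_cast; ring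

-- A's outer loop: one flat enumerated list of all [y, x] values
lemma pv_outer (ys : List Int) (L : List Int) :
    ∀ (d : PySem.Dict Int (List Int)) (i : Int), (∀ k ∈ d.keys, k < i) →
    ys.foldl (fun (st : PySem.Dict Int (List Int) × Int) y =>
        L.foldl (fun st x => (st.1.insert st.2 [y, x], st.2 + 1)) st) (d, i)
      = (PySem.Dict.mk (d.items ++
           PySem.List.enumerate (ys.flatMap (fun y => L.map (fun x => [y, x]))) i),
         i + ((ys.length : Int) * (L.length : Int))) := by
  induction ys with
  | nil =>
      intro d i _
      simp [PySem.List.enumerate_nil]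
  | cons y ys ih =>
      intro d i hfresh
      simp only [List.foldl_cons]
      rw [pv_inner L y d i hfresh]
      have hkeys : ∀ k ∈ (PySem.Dict.mk (d.items ++ PySem.List.enumerate (L.map (fun x => [y, x])) i) : PySem.Dict Int (List Int)).keys,
          k < i + (L.length : Int) := by
        intro k hk
        simp only [PySem.Dict.keys, List.map_append, List.mem_append] at hk
        rcases hk with hk | hk
        · have := hfresh k hk; omega
        · have : k ∈ (PySem.List.enumerate (L.map (fun x => [y, x])) i).map (·.1) :=
            List.mem_map.2 ⟨_, List.mem_map.1 hk |>.choose_spec.1, List.mem_map.1 hk |>.choose_spec.2⟩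
          rw [PySem.List.map_fst_enumerate] at this
          have := (PySem.List.mem_pyRange_one).1 this
          simp at this ⊢
          omega
      rw [ih _ _ hkeys]
      simp only [List.flatMap_cons]
      rw [pv_enumerate_append]
      simp only [Prod.mk.injEq]
      constructor
      · congr 1
        simp [List.append_assoc]
      · simp only [List.length_cons]
        push_cast; ring

-- one row of B's flat range equals the enumerated row of A, by arithmetic decoding
lemma pv_row (r c : Nat) (hc : 0 < c) :
    ∀ (c' : Nat), c' ≤ c →
    PySem.List.enumerate ((PySem.List.pyRange 0 (c' : Int) 1).map (fun x => [(r : Int), x])) ((r * c : Nat) + 1)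
      = (PySem.List.pyRange ((r * c : Nat) + 1) ((r * c : Nat) + (c' : Int) + 1) 1).map
          (fun i => (i, [PySem.Int.floordiv (i - 1) (c : Int), PySem.Int.mod (i - 1) (c : Int)])) := by
  intro c' hc'
  induction c' with
  | zero =>
      rw [PySem.List.pyRange_one_eq_nil (by norm_num), PySem.List.pyRange_one_eq_nil (by push_cast; omega)]
      simp [PySem.List.enumerate_nil]
  | succ c'' ih =>
      have h1 : ((c'' + 1 : Nat) : Int) = (c'' : Int) + 1 := by push_cast; ring
      rw [h1, PySem.List.pyRange_one_succ_right (by positivity)]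
      have h2 : ((r * c : Nat) : Int) + ((c'' : Int) + 1) + 1 = (((r * c : Nat) : Int) + (c'' : Int) + 1) + 1 := by ring
      rw [h2, PySem.List.pyRange_one_succ_right (by push_cast; omega)]
      simp only [List.map_append, List.map_cons, List.map_nil]
      rw [pv_enumerate_append]
      rw [ih (by omega)]
      congr 1
      have hlen : (((PySem.List.pyRange 0 (c'' : Int) 1).map (fun x => [(r : Int), x])).length : Int) = (c'' : Int) := by
        simp [PySem.List.length_pyRange_one]
      rw [hlen]
      simp only [PySem.List.enumerate_cons, PySem.List.enumerate_nil]
      have hcc : (c'' : Int) < (c : Int) := by exact_mod_cast Nat.lt_of_succ_le hc'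
      have harg : ((r * c : Nat) : Int) + 1 + (c'' : Int) - 1 = (r : Int) * (c : Int) + (c'' : Int) := by
        push_cast; ring
      have hfd : PySem.Int.floordiv ((r : Int) * (c : Int) + (c'' : Int)) (c : Int) = (r : Int) := by
        rw [PySem.Int.floordiv_eq_iff_of_pos (by exact_mod_cast hc)]
        constructor
        · have : (0 : Int) ≤ (c'' : Int) := by positivity
          linarith
        · have : ((r : Int) + 1) * (c : Int) = (r : Int) * (c : Int) + (c : Int) := by ring
          rw [this]; linarith
      have hmd : PySem.Int.mod ((r : Int) * (c : Int) + (c'' : Int)) (c : Int) = (c'' : Int) := by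
        rw [PySem.Int.mod_eq_emod_of_pos (by exact_mod_cast hc)]
        have e : ((r:Int) * (c:Int) + (c'':Int)) % (c:Int) = (c'':Int) % (c:Int) := by
          rw [add_comm, mul_comm]; exact Int.add_mul_emod_self_left _ _ _
        rw [e]
        exact Int.emod_eq_of_lt (by positivity) hcc
      have e1 : ((r * c : Nat) : Int) + (c'' : Int) + 1 - 1 = (r : Int) * (c : Int) + (c'' : Int) := by
        push_cast; ring
      rw [e1, hfd, hmd]
      have e2 : ((r * c : Nat) : Int) + 1 + (c'' : Int) = ((r * c : Nat) : Int) + (c'' : Int) + 1 := by ring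
      rw [e2]

-- the fully enumerated nested list is B's flat map
lemma pv_bridge (c : Nat) (hc : 0 < c) (r : Nat) :
    PySem.List.enumerate
        ((PySem.List.pyRange 0 (r : Int) 1).flatMap
          (fun y => (PySem.List.pyRange 0 (c : Int) 1).map (fun x => [y, x]))) 1
      = (PySem.List.pyRange 1 ((r : Int) * (c : Int) + 1) 1).map
          (fun i => (i, [PySem.Int.floordiv (i - 1) (c : Int), PySem.Int.mod (i - 1) (c : Int)])) := by
  induction r with
  | zero =>
      simp only [Nat.cast_zero, zero_mul, zero_add]
      rw [PySem.List.pyRange_one_eq_nil (le_refl 0), PySem.List.pyRange_one_eq_nil (le_refl 1)]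
      simp [PySem.List.enumerate_nil]
  | succ r ih =>
      have h1 : ((r + 1 : Nat) : Int) = (r : Int) + 1 := by push_cast; ring
      rw [h1, PySem.List.pyRange_one_succ_right (by positivity)]
      rw [List.flatMap_append]
      rw [pv_enumerate_append, ih]
      have hlen : (((PySem.List.pyRange 0 (r : Int) 1).flatMap
          (fun y => (PySem.List.pyRange 0 (c : Int) 1).map (fun x => [y, x]))).length : Int)
          = (r : Int) * (c : Int) := by
        rw [List.length_flatMap]
        have : ∀ y ∈ PySem.List.pyRange 0 (r : Int) 1,
            ((PySem.List.pyRange 0 (c : Int) 1).map (fun x => [y, x])).length = c := by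
          intro y _; simp [PySem.List.length_pyRange_one]
        rw [List.map_congr_left (by intro y hy; exact this y hy)]
        simp [List.sum_replicate, List.map_const', PySem.List.length_pyRange_one]
      rw [hlen]
      have hrow := pv_row r c hc c (le_refl c)
      have hcast : (((r * c : Nat) : Int)) = (r : Int) * (c : Int) := by push_cast; ring
      rw [hcast] at hrow
      have h3 : (1 : Int) + (r : Int) * (c : Int) = (r : Int) * (c : Int) + 1 := by ring
      rw [List.flatMap_singleton, h3, hrow]
      rw [← List.map_append]
      congr 1
      have hb : ((r : Int) + 1) * (c : Int) + 1 = (r : Int) * (c : Int) + (c : Int) + 1 := by ring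
      rw [hb]
      have h0 : (0:Int) ≤ (r : Int) * (c : Int) := by positivity
      have h4 : (0:Int) < (c : Int) := by exact_mod_cast hc
      exact (PySem.List.pyRange_one_append 1 ((r : Int) * (c : Int) + 1) ((r : Int) * (c : Int) + (c : Int) + 1)
            (by linarith) (by linarith)).symm

-- ===== VERDICT (by name: the statement is the Claim_ definition above) =====
theorem possMoves_spec : Claim_equal_possMoves := by
  intro board size _
  unfold Spec_possMoves possMoves possMoves_alt
  cases board with
  | nil =>
      simp [PySem.List.pyRange_one_eq_nil (le_refl 0), PySem.Dict.empty]
  | cons row rest =>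
      simp only [List.headD_cons]
      have hget : PySem.List.pyGetD (row :: rest) 0 ([] : List Int) = row := by
        simp [PySem.List.pyGetD_zero_cons]
      rw [hget]
      rw [pv_outer _ _ PySem.Dict.empty 1 (by intro k hk; simp [PySem.Dict.keys_empty] at hk)]
      simp only
      by_cases hc : row.length = 0
      · rw [hc]
        have hflat : ((PySem.List.pyRange 0 ((row :: rest).length : Int) 1).flatMap
            (fun y => (PySem.List.pyRange 0 ((0:Nat) : Int) 1).map (fun x => [y, x]))) = [] := by
          simp [PySem.List.pyRange_one_eq_nil (le_refl (0:Int))]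
        rw [hflat]
        rw [PySem.List.pyRange_one_eq_nil (by push_cast; omega)]
        simp [PySem.List.enumerate_nil, PySem.Dict.empty]
      · rw [pv_bridge row.length (Nat.pos_of_ne_zero hc) (row :: rest).length]
        simp [PySem.Dict.empty]
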